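-- pv_equiv track=rewrite | github.com/mariusmeikstaub-star/Domain-Checker2 | utils_registered.py | is_brand
-- ===== SOURCE A (Python) =====
-- def is_brand(domain: str) -> bool:
--     """
--     Very small heuristic: returns True if the SLD matches a known brand (nike etc.).
--     """
--     d = str(domain).strip().lower()
--     if '.' in d:
--         sld = d.split('.')[0]
--     else:
--         sld = d
--
--     brands = {
--         "nike","adidas","amazon","apple","google","microsoft","facebook","meta","tesla","samsung","netflix",
--         "paypal","spotify","reddit","twitter","x","intel","amd","nvidia","bmw","mercedes","audi","shell",
--         "coca","cocacola","coke","pepsi","mcdonalds","mcdonald","burgerking"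
--     }
--     # direct match or startswith/endswith brand (avoid too many false positives)
--     return (sld in brands) or any(sld.startswith(b) or sld.endswith(b) for b in brands)
-- ===== SOURCE B (Python) =====
-- def is_brand(domain: str) -> bool:
--     """
--     Very small heuristic: returns True if the SLD matches a known brand (nike etc.).
--     """
--     d = str(domain).strip().lower()
--     sld = d.split('.')[0] if '.' in d else d
--
--     brands = {
--         "nike","adidas","amazon","apple","google","microsoft","facebook","meta","tesla","samsung","netflix",
--         "paypal","spotify","reddit","twitter","x","intel","amd","nvidia","bmw","mercedes","audi","shell",
--         "coca","cocacola","coke","pepsi","mcdonalds","mcdonald","burgerking"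
--     }
--     # look the SLD's own short prefixes/suffixes up in the set instead of sweeping the brand list
--     longest = max(map(len, brands))
--     n = len(sld)
--     return any(sld[:i] in brands or sld[n - i:] in brands
--                for i in range(1, min(n, longest) + 1))
-- ===== Notes on version B (the rewrite author's own statement) =====
-- stated objective: alternative
-- what changed: Instead of sweeping the brand set with startswith/endswith plus a separate exact-membership test, B iterates over the SLD's own prefix/suffix lengths up to the longest brand name and looks each substring up in the set; the exact-match test disappears since the full string is one of the checked prefixes.
import Mathlib
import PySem

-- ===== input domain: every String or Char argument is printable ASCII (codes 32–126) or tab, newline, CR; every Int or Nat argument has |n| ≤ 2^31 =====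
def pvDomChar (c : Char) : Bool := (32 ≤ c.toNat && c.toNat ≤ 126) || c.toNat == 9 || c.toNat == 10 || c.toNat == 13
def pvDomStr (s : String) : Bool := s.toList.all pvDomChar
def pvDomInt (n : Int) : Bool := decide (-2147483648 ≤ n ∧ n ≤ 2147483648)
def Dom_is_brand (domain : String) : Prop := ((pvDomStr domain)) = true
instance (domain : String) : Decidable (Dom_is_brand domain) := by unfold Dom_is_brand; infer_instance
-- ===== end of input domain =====

-- B looks the SLD's own short prefixes/suffixes up in the brand set (lengths up to the longest brand) instead of sweeping the brand set with startswith/endswith; same return value, alternative traversal.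


-- ===== PORT A =====
-- the brand set literal (both Pythons spell out this same literal)
def pvBrands : List String :=
  ["nike","adidas","amazon","apple","google","microsoft","facebook","meta","tesla","samsung","netflix",
   "paypal","spotify","reddit","twitter","x","intel","amd","nvidia","bmw","mercedes","audi","shell",
   "coca","cocacola","coke","pepsi","mcdonalds","mcdonald","burgerking"]

def is_brand (domain : String) : Bool :=
  let d := PySem.Str.lower (PySem.Str.strip domain)
  let sld := if PySem.Str.isIn "." d then ((PySem.Str.split? d ".").getD []).headD "" else d
  let brands : PySem.Set String := PySem.Set.ofList pvBrands
  PySem.Set.contains brands sld ||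
    brands.any (fun b => PySem.Str.startswith sld b || PySem.Str.endswith sld b)

-- ===== PORT B =====
def is_brand_alt (domain : String) : Bool :=
  let d := PySem.Str.lower (PySem.Str.strip domain)
  let sld := if PySem.Str.isIn "." d then ((PySem.Str.split? d ".").getD []).headD "" else d
  let brands : PySem.Set String := PySem.Set.ofList pvBrands
  -- longest = max(map(len, brands)): max of lengths over the set, order-independent
  let longest := (PySem.List.max? (brands.map PySem.Str.len) (fun x => x)).getD 0
  let n := PySem.Str.len sld
  (PySem.List.pyRange 1 (min n longest + 1)).any fun i =>
    PySem.Set.contains brands (PySem.Str.slice sld none (some i)) ||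
      PySem.Set.contains brands (PySem.Str.slice sld (some (n - i)) none)

-- ===== PRECONDITION & SPEC =====
def Spec_is_brand (domain : String) (out : Bool) : Prop := out = is_brand_alt domain
instance (domain : String) (out : Bool) : Decidable (Spec_is_brand domain out) := by unfold Spec_is_brand; infer_instance

-- ===== CLAIM (what is proved, stated in full; the proofs are below) =====
def Claim_equal_is_brand : Prop := ∀ (domain : String), Dom_is_brand domain → Spec_is_brand domain (is_brand domain)

-- ===== LEMMAS AND PROOFS =====

theorem pvBrands_ne_empty : ∀ b ∈ pvBrands, b ≠ "" := by decide
theorem pvBrands_short : ∀ b ∈ pvBrands, b.toList.length ≤ 10 := by decide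
theorem pvLongest :
    (PySem.List.max? ((PySem.Set.ofList pvBrands).map PySem.Str.len) (fun x => x)).getD 0 = 10 := by
  decide

theorem pv_core (s : String) :
    (PySem.Set.contains (PySem.Set.ofList pvBrands) s ||
      (PySem.Set.ofList pvBrands).any
        (fun b => PySem.Str.startswith s b || PySem.Str.endswith s b))
    = ((PySem.List.pyRange 1
          (min (PySem.Str.len s)
            ((PySem.List.max? ((PySem.Set.ofList pvBrands).map PySem.Str.len) (fun x => x)).getD 0) + 1)).any
        (fun i => PySem.Set.contains (PySem.Set.ofList pvBrands) (PySem.Str.slice s none (some i)) ||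
          PySem.Set.contains (PySem.Set.ofList pvBrands) (PySem.Str.slice s (some (PySem.Str.len s - i)) none))) := by
  rw [pvLongest, Bool.eq_iff_iff]
  simp only [Bool.or_eq_true, List.any_eq_true, PySem.Set.contains_iff, PySem.Set.mem_ofList,
    PySem.Str.startswith_eq, PySem.Str.endswith_eq, PySem.Chars.startswith_iff,
    PySem.Chars.endswith_iff, PySem.List.mem_pyRange_one, PySem.Str.len_eq]
  constructor
  · rintro (hs | ⟨b, hb, hpre | hsuf⟩)
    · -- exact member: i = length, the full-string prefix
      have hne : s.toList ≠ [] := by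
        intro h
        exact pvBrands_ne_empty s hs (String.toList_inj.mp (by simp [h]))
      have hpos : 0 < s.toList.length := List.length_pos_iff.mpr hne
      have hshort : s.toList.length ≤ 10 := pvBrands_short s hs
      refine ⟨(s.toList.length : ℤ), ⟨by omega, by omega⟩, Or.inl ?_⟩
      have : (PySem.Str.slice s none (some (s.toList.length : ℤ))).toList = s.toList := by
        simp [PySem.Str.toList_slice, PySem.Chars.slice_eq_listSlice]
      rw [String.toList_inj.mp this]; exact hs
    · -- b is a prefix: i = b.length
      have hbne : b.toList ≠ [] := by
        intro h
        exact pvBrands_ne_empty b hb (String.toList_inj.mp (by simp [h]))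
      have hpos : 0 < b.toList.length := List.length_pos_iff.mpr hbne
      have hshort : b.toList.length ≤ 10 := pvBrands_short b hb
      have hlen : b.toList.length ≤ s.toList.length := hpre.length_le
      refine ⟨(b.toList.length : ℤ), ⟨by omega, by omega⟩, Or.inl ?_⟩
      have : (PySem.Str.slice s none (some (b.toList.length : ℤ))).toList = b.toList := by
        simp [PySem.Str.toList_slice, PySem.Chars.slice_eq_listSlice]
        exact (List.prefix_iff_eq_take.mp hpre).symm
      rw [String.toList_inj.mp this]; exact hb
    · -- b is a suffix: i = b.length, the slice starts at n - i
      have hbne : b.toList ≠ [] := by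
        intro h
        exact pvBrands_ne_empty b hb (String.toList_inj.mp (by simp [h]))
      have hpos : 0 < b.toList.length := List.length_pos_iff.mpr hbne
      have hshort : b.toList.length ≤ 10 := pvBrands_short b hb
      have hlen : b.toList.length ≤ s.toList.length := hsuf.length_le
      refine ⟨(b.toList.length : ℤ), ⟨by omega, by omega⟩, Or.inr ?_⟩
      rw [show ((s.toList.length : ℤ) - (b.toList.length : ℤ))
            = ((s.toList.length - b.toList.length : ℕ) : ℤ) by omega]
      have : (PySem.Str.slice s (some ((s.toList.length - b.toList.length : ℕ) : ℤ)) none).toList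
          = b.toList := by
        simp [PySem.Str.toList_slice, PySem.Chars.slice_eq_listSlice]
        exact (List.suffix_iff_eq_drop.mp hsuf).symm
      rw [String.toList_inj.mp this]; exact hb
  · rintro ⟨i, ⟨h1, h2⟩, hpre | hsuf⟩
    · right
      refine ⟨_, hpre, Or.inl ?_⟩
      rw [PySem.Str.toList_slice, PySem.Chars.slice_eq_listSlice,
        PySem.List.slice_to _ (by omega : (0:ℤ) ≤ i)]
      exact List.take_prefix _ _
    · right
      refine ⟨_, hsuf, Or.inr ?_⟩
      rw [PySem.Str.toList_slice, PySem.Chars.slice_eq_listSlice,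
        PySem.List.slice_from _ (by omega : (0:ℤ) ≤ (s.toList.length : ℤ) - i)]
      exact List.drop_suffix _ _

theorem is_brand_eq (domain : String) : is_brand domain = is_brand_alt domain := by
  unfold is_brand is_brand_alt
  exact pv_core _

-- ===== VERDICT (by name: the statement is the Claim_ definition above) =====
theorem is_brand_spec : Claim_equal_is_brand := by
  intro domain _
  unfold Spec_is_brand
  exact is_brand_eq domain
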